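-- pv_equiv track=rewrite | github.com/WadhwaniAI/StudentDropoutEWS | src/feature_engineering.py | scaling_factor_attendance_features
-- ===== SOURCE A (Python) =====
-- def scaling_factor_attendance_features(L, s):
--
--      '''
--      Description:
--           Computes the maximum possible occurrences of a string "s" in a given length value L.
--           For example, for a given string s "papa" and length L=10, the maximum possible occurences of s in L would be 4 ("papapapapa").
--      Args:
--           L: The length in which s needs to fit.
--           s: The string whose maximum possible occcurences in length L need to be computed.
--      Returns:
--           Max possible occurrences (int) of s in L.
--      '''
--
--      # l is max length from start of string s that occurs again in some part of s.
--      l = 0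
--      for i in range(1, len(s)):
--           if s[0:i] == s[-i:]:
--                if i > l:
--                     l = i
--
--      # counter to keep track of number of occurrences
--      ctr = 1
--
--      # appending unit in given pattern
--      unit_to_append = s[l:]
--
--      # continue until we fill L totally
--      while (len(s)+len(unit_to_append)) <= L:
--           s = s + unit_to_append
--           ctr += 1
--
--      # final number of occurrences is counter
--      return ctr
-- ===== SOURCE B (Python) =====
-- def scaling_factor_attendance_features(L, s):
--     n = len(s)
--     # largest border: scan candidate lengths downward, first match is the maximum
--     b = 0
--     for i in range(n - 1, 0, -1):
--         if s.endswith(s[:i]):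
--             b = i
--             break
--     # each extra occurrence appends the non-border tail (length n - b): closed-form count
--     return 1 + max(0, (L - n) // (n - b))
-- ===== Notes on version B (the rewrite author's own statement) =====
-- stated objective: faster
-- what changed: B replaces A's while-loop that repeatedly appends the tail and rebuilds the string up to length L by a closed-form floor-division count, and finds the maximal border by a downward first-match endswith scan instead of A's upward two-slice max-fold.
-- outside the precondition, e.g. on scaling_factor_attendance_features(-1, ''): A returns 1, B raises ZeroDivisionError; on scaling_factor_attendance_features(5, ''): A does not finish within the time limit, B raises ZeroDivisionError
import Mathlib
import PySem

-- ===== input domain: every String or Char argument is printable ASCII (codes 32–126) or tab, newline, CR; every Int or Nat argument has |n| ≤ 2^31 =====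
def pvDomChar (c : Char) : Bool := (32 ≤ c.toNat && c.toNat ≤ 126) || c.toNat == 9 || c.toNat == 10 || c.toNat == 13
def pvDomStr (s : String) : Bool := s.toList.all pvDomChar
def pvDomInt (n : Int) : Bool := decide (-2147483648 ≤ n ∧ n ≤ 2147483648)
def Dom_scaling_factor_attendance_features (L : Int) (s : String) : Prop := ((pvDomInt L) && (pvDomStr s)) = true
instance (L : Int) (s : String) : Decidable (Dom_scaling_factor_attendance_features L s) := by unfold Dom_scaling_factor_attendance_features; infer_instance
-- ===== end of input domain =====

-- B replaces A's repeated string-appending loop by a closed-form floor-division count and finds the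
-- maximal border by a first-match downward scan with endswith instead of an upward two-slice max-fold.

-- ===== PORT A =====
-- l = 0; for i in range(1, len(s)): if s[0:i] == s[-i:]: if i > l: l = i
def pvBorderA (cs : List Char) : Int :=
  (PySem.List.pyRange 1 cs.length).foldl
    (fun l i =>
      if PySem.List.slice cs (some 0) (some i) = PySem.List.slice cs (some (-i)) none then
        (if l < i then i else l)
      else l) 0

-- while (len(s)+len(unit_to_append)) <= L: s = s + unit_to_append; ctr += 1
-- the Python loop reads s only through len(s), so the port carries slen = len(s) as the state
-- (the '0 < ulen' conjunct is a totality guard only: with an empty unit the Python loop never terminates)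
def pvLoopA (L : Int) (ulen : Int) (slen : Int) (ctr : Int) : Int :=
  if h : (slen + ulen ≤ L) ∧ 0 < ulen then
    pvLoopA L ulen (slen + ulen) (ctr + 1)
  else ctr
termination_by (L - slen).toNat
decreasing_by omega

def scaling_factor_attendance_features (L : Int) (s : String) : Int :=
  let cs := s.toList
  let l := pvBorderA cs
  let unit := PySem.List.slice cs (some l) none
  pvLoopA L unit.length cs.length 1

-- ===== PORT B =====
-- for i in range(n-1, 0, -1): if s.endswith(s[:i]): b = i; break   (downward scan, first match)
def pvBorderB (cs : List Char) : Nat → Nat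
  | 0 => 0
  | i + 1 =>
    if PySem.Chars.endswith cs (cs.take (i + 1)) then i + 1 else pvBorderB cs i

def scaling_factor_attendance_features_alt (L : Int) (s : String) : Int :=
  let cs := s.toList
  let n := cs.length
  let b := pvBorderB cs (n - 1)
  1 + max 0 (PySem.Int.floordiv (L - n) ((n : Int) - b))

-- ===== PRECONDITION & SPEC =====
-- Pre_ excludes only the empty string: there A loops forever for L ≥ 0 (empty append unit),
-- and for L < 0 its returned 1 is a degenerate artefact on which B's division by zero raises.
def Pre_scaling_factor_attendance_features (L : Int) (s : String) : Prop := s ≠ ""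
instance (L : Int) (s : String) : Decidable (Pre_scaling_factor_attendance_features L s) := by unfold Pre_scaling_factor_attendance_features; infer_instance
def pvWitness_scaling_factor_attendance_features : Int × String := (10, "papa")
def Spec_scaling_factor_attendance_features (L : Int) (s : String) (out : Int) : Prop := out = scaling_factor_attendance_features_alt L s
instance (L : Int) (s : String) (out : Int) : Decidable (Spec_scaling_factor_attendance_features L s out) := by unfold Spec_scaling_factor_attendance_features; infer_instance

-- ===== CLAIM (what is proved, stated in full; the proofs are below) =====
def Claim_equal_scaling_factor_attendance_features : Prop := ∀ (L : Int) (s : String), Dom_scaling_factor_attendance_features L s → Pre_scaling_factor_attendance_features L s → Spec_scaling_factor_attendance_features L s (scaling_factor_attendance_features L s)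

-- ===== LEMMAS AND PROOFS =====

-- B's downward first-match border never exceeds its scan bound
theorem pvBorderB_le (cs : List Char) (i : Nat) : pvBorderB cs i ≤ i := by
  induction i with
  | zero => simp [pvBorderB]
  | succ k ih =>
    simp only [pvBorderB]
    split
    · exact Nat.le_refl _
    · exact Nat.le_trans ih (Nat.le_succ k)

-- a prefix is a suffix iff it equals the tail of the same length
theorem take_eq_drop_iff_suffix (cs : List Char) (j : Nat) :
    cs.take j = cs.drop (cs.length - j) ↔ cs.take j <:+ cs := by
  constructor
  · intro h
    rw [h]
    exact List.drop_suffix _ _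
  · intro h
    rw [List.suffix_iff_eq_drop, List.length_take] at h
    rw [h]
    congr 1
    omega

-- A's upward max-fold over 1..m equals B's downward first-match scan from m
theorem borderA_eq_borderB (cs : List Char) (m : Nat) :
    (PySem.List.pyRange 1 ((m : Int) + 1)).foldl
      (fun l i =>
        if PySem.List.slice cs (some 0) (some i) = PySem.List.slice cs (some (-i)) none then
          (if l < i then i else l)
        else l) 0 = (pvBorderB cs m : Int) := by
  induction m with
  | zero => simp [PySem.List.pyRange, pvBorderB]
  | succ k ih =>
    rw [show ((k + 1 : Nat) : Int) + 1 = ((k : Int) + 1) + 1 by push_cast; ring,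
        PySem.List.pyRange_one_succ_right (by omega), List.foldl_append, ih]
    simp only [List.foldl_cons, List.foldl_nil]
    have hcond : (PySem.List.slice cs (some 0) (some ((k : Int) + 1)) =
        PySem.List.slice cs (some (-((k : Int) + 1))) none) ↔
        (PySem.Chars.endswith cs (cs.take (k + 1)) = true) := by
      rw [PySem.Chars.endswith_iff]
      rw [show -((k : Int) + 1) = -((k + 1 : Nat) : Int) by push_cast; ring,
          show ((k : Int) + 1) = ((k + 1 : Nat) : Int) by push_cast; ring,
          PySem.List.slice_from_neg_natCast cs (k + 1) (by omega),
          PySem.List.slice_zero_start, PySem.List.slice_to_natCast]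
      exact take_eq_drop_iff_suffix cs (k + 1)
    have hle := pvBorderB_le cs k
    by_cases h : PySem.Chars.endswith cs (cs.take (k + 1)) = true
    · rw [if_pos (hcond.mpr h), if_pos (by exact_mod_cast Nat.lt_succ_of_le hle)]
      simp [pvBorderB, h]
    · rw [if_neg (fun hc => h (hcond.mp hc))]
      simp [pvBorderB, h]

-- the append loop counts appends in closed form
theorem pvLoopA_eq (L : Int) (ulen slen ctr : Int) (hu : 0 < ulen) :
    pvLoopA L ulen slen ctr = ctr + max 0 (PySem.Int.floordiv (L - slen) ulen) := by
  fun_induction pvLoopA L ulen slen ctr with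
  | case1 slen ctr h ih =>
    rw [ih]
    have hsub : PySem.Int.floordiv (L - slen - ulen) ulen =
        PySem.Int.floordiv (L - slen) ulen - 1 := by
      rw [PySem.Int.floordiv_eq_ediv_of_pos hu, PySem.Int.floordiv_eq_ediv_of_pos hu,
          show L - slen - ulen = L - slen + (-1) * ulen by ring,
          Int.add_mul_ediv_right _ _ (by omega)]
      ring
    have hge : (1 : Int) ≤ PySem.Int.floordiv (L - slen) ulen := by
      rw [PySem.Int.le_floordiv_iff_mul_le hu]
      have := h.1
      omega
    rw [show L - (slen + ulen) = L - slen - ulen by ring, hsub]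
    omega
  | case2 slen ctr h =>
    have hlt : PySem.Int.floordiv (L - slen) ulen < 1 := by
      rw [PySem.Int.floordiv_lt_iff_lt_mul hu]
      have : ¬ (slen + ulen ≤ L) := fun hc => h ⟨hc, hu⟩
      omega
    omega

-- ===== VERDICT (by name: the statement is the Claim_ definition above) =====
theorem scaling_factor_attendance_features_spec : Claim_equal_scaling_factor_attendance_features := by
  intro L s _ hpre
  have hcs : s.toList ≠ [] := by
    intro h
    exact hpre (by simpa using congrArg String.ofList h)
  unfold Spec_scaling_factor_attendance_features
  unfold scaling_factor_attendance_features scaling_factor_attendance_features_alt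
  dsimp only
  set cs := s.toList with hcsdef
  set n := cs.length with hn
  have hn1 : 1 ≤ n := by
    have := List.length_pos_iff.mpr hcs
    omega
  have hb := pvBorderB_le cs (n - 1)
  set b := pvBorderB cs (n - 1) with hbdef
  -- A's border value equals B's
  have hA : pvBorderA cs = (b : Int) := by
    unfold pvBorderA
    rw [show ((cs.length : Int)) = ((n - 1 : Nat) : Int) + 1 by rw [← hn]; omega]
    exact borderA_eq_borderB cs (n - 1)
  rw [hA, PySem.List.slice_from cs (by positivity)]
  have hblt : b < n := by omega
  have hulen : (0 : Int) < ((cs.drop ((b : Int)).toNat).length : Int) := by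
    rw [Int.toNat_natCast]
    simp [← hn]
    omega
  rw [pvLoopA_eq L _ _ 1 hulen]
  have hlen : ((cs.drop ((b : Int)).toNat).length : Int) = (n : Int) - b := by
    rw [Int.toNat_natCast]
    simp [← hn]
    omega
  rw [hlen]
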